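-- pv_equiv track=rewrite | github.com/symin07/Algorithm | Week5/FeedDog.py | feedDog
-- ===== SOURCE A (Python) =====
-- def feedDog(hunger_level, biscuit_size):
--     satiDog = 0
--     leastHung = min(hunger_level) # sorting algorithm, if using heap sort, the time complexity is O(nlogn)
--     leastBis = min(biscuit_size)
--     while hunger_level and biscuit_size:
--         if leastHung > leastBis:
--             biscuit_size.remove(leastBis)
--         else:
--             biscuit_size.remove(leastBis)
--             hunger_level.remove(leastHung)
--             satiDog = satiDog + 1
--
--         if hunger_level:
--             leastHung = min(hunger_level)
--         if biscuit_size: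
--             leastBis = min(biscuit_size)
--
--     return satiDog
-- ===== SOURCE B (Python) =====
-- def feedDog(hunger_level, biscuit_size):
--     dogs = sorted(hunger_level)
--     i = 0
--     for b in sorted(biscuit_size):
--         if i < len(dogs) and dogs[i] <= b:
--             i += 1
--     return i
-- ===== Notes on version B (the rewrite author's own statement) =====
-- stated objective: faster
-- what changed: A repeatedly computes min() of both lists and removes elements in place (O(n) work per loop iteration); B sorts both lists once and does a single two-pointer greedy pass over them.
import Mathlib
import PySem

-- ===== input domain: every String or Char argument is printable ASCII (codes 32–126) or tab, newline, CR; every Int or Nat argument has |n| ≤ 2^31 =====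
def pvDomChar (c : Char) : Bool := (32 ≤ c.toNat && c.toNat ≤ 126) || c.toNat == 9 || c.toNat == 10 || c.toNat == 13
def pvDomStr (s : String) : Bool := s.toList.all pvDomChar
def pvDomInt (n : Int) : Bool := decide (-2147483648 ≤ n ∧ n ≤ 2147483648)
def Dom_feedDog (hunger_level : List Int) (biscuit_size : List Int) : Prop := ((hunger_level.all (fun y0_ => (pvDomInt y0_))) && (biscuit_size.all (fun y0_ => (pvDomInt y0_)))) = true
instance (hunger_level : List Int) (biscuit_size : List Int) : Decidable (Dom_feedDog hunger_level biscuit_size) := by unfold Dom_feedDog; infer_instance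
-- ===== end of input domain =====

-- B replaces A's quadratic repeated-min-and-remove loop with sort-both-then-one-greedy-pass (faster);
-- A mutates its list arguments in place, B does not: the equivalence proved here is about the return value only.

-- ===== PORT A =====
-- while hunger_level and biscuit_size: remove min(biscuit_size); if min fits, also remove min(hunger_level), count it;
-- then leastHung/leastBis are recomputed only if the list is nonempty ('.getD' keeps the old value exactly as Python does).
def feedDogLoop (hl bs : List Int) (leastHung leastBis satiDog : Int) : Int :=
  if hcond : hl ≠ [] ∧ bs ≠ [] then
    let bs' := (PySem.List.remove? bs leastBis).getD []   -- biscuit_size.remove(leastBis); totalised, always succeeds here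
    if leastHung > leastBis then
      feedDogLoop hl bs'
        ((PySem.List.min? hl (fun x => x)).getD leastHung)
        ((PySem.List.min? bs' (fun x => x)).getD leastBis) satiDog
    else
      let hl' := (PySem.List.remove? hl leastHung).getD []  -- hunger_level.remove(leastHung)
      feedDogLoop hl' bs'
        ((PySem.List.min? hl' (fun x => x)).getD leastHung)
        ((PySem.List.min? bs' (fun x => x)).getD leastBis) (satiDog + 1)
  else satiDog
termination_by bs.length
decreasing_by
  all_goals
    rcases hcond with ⟨-, hbs⟩
    show ((PySem.List.remove? bs leastBis).getD []).length < bs.length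
    by_cases hm : leastBis ∈ bs
    · simp only [PySem.List.remove?_eq_some_erase bs leastBis hm, Option.getD_some]
      have h1 := List.length_erase_of_mem hm
      have h2 := List.length_pos_of_mem hm
      omega
    · simp only [(PySem.List.remove?_eq_none_iff bs leastBis).mpr hm, Option.getD_none]
      cases bs
      · exact absurd rfl hbs
      · simp

def feedDog (hunger_level : List Int) (biscuit_size : List Int) : Int :=
  match PySem.List.min? hunger_level (fun x => x), PySem.List.min? biscuit_size (fun x => x) with
  | some lh, some lb => feedDogLoop hunger_level biscuit_size lh lb 0
  | _, _ => 0   -- Python raises ValueError here (empty list); excluded by Pre_feedDog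

-- ===== PORT B =====
def feedDog_alt (hunger_level : List Int) (biscuit_size : List Int) : Int :=
  let dogs := PySem.List.sorted hunger_level (fun x => x) false
  (PySem.List.sorted biscuit_size (fun x => x) false).foldl
    (fun i b =>
      if i < (dogs.length : Int) then
        match PySem.List.pyGet? dogs i with
        | some d => if d ≤ b then i + 1 else i
        | none => i
      else i) 0

-- ===== PRECONDITION & SPEC =====
-- Python's min() raises ValueError on an empty list, so A raises whenever either argument is empty.
def Pre_feedDog (hunger_level : List Int) (biscuit_size : List Int) : Prop :=
  hunger_level ≠ [] ∧ biscuit_size ≠ []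
instance (hunger_level : List Int) (biscuit_size : List Int) : Decidable (Pre_feedDog hunger_level biscuit_size) := by unfold Pre_feedDog; infer_instance
def pvWitness_feedDog : List Int × List Int := ([3, 1, 2], [1, 4, 2])

def Spec_feedDog (hunger_level : List Int) (biscuit_size : List Int) (out : Int) : Prop := out = feedDog_alt hunger_level biscuit_size
instance (hunger_level : List Int) (biscuit_size : List Int) (out : Int) : Decidable (Spec_feedDog hunger_level biscuit_size out) := by unfold Spec_feedDog; infer_instance

-- ===== CLAIM (what is proved, stated in full; the proofs are below) =====
def Claim_equal_feedDog : Prop := ∀ (hunger_level : List Int) (biscuit_size : List Int), Dom_feedDog hunger_level biscuit_size → Pre_feedDog hunger_level biscuit_size → Spec_feedDog hunger_level biscuit_size (feedDog hunger_level biscuit_size)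

-- ===== LEMMAS AND PROOFS =====

-- the common value of both programs: the two-pointer greedy on sorted lists, structurally
def pvGreedy : List Int → List Int → Int
  | h :: hs, b :: bs => if h ≤ b then pvGreedy hs bs + 1 else pvGreedy (h :: hs) bs
  | _, _ => 0

theorem pvGreedy_nil_right (hs : List Int) : pvGreedy hs [] = 0 := by
  cases hs <;> rfl

theorem pvGreedy_nil_left (bs : List Int) : pvGreedy [] bs = 0 := by
  cases bs <;> rfl

-- the (first) minimum of a nonempty list heads its sorted order
theorem sorted_eq_min_cons (l : List Int) (m : Int)
    (hm : PySem.List.min? l (fun x => x) = some m) :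
    PySem.List.sorted l (fun x => x) false =
      m :: PySem.List.sorted (l.erase m) (fun x => x) false := by
  have hmem : m ∈ l := PySem.List.min?_mem hm
  have hmin : ∀ y ∈ l, m ≤ y := by
    intro y hy; exact PySem.List.min?_isMin hm y hy
  have hperm : (m :: PySem.List.sorted (l.erase m) (fun x => x) false).Perm l :=
    (List.Perm.cons m (PySem.List.sorted_perm _ _ _)).trans
      (List.perm_cons_erase hmem).symm
  refine PySem.List.sorted_id_eq_of_perm_of_pairwise l _ hperm ?_
  refine List.pairwise_cons.mpr ⟨?_, ?_⟩
  · intro y hy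
    have : y ∈ l.erase m := (PySem.List.mem_sorted _ _ _ _).mp hy
    exact hmin y (List.mem_of_mem_erase this)
  · have := PySem.List.sorted_pairwise (l.erase m) (fun x => x)
    simpa using this

-- A's loop, started with the true minima, computes the greedy on sorted lists
theorem feedDogLoop_eq_greedy (n : Nat) :
    ∀ (hl bs : List Int) (sati mh mb : Int), bs.length = n →
      hl ≠ [] → bs ≠ [] →
      PySem.List.min? hl (fun x => x) = some mh →
      PySem.List.min? bs (fun x => x) = some mb →
      feedDogLoop hl bs mh mb sati =
        sati + pvGreedy (PySem.List.sorted hl (fun x => x) false)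
                        (PySem.List.sorted bs (fun x => x) false) := by
  induction n with
  | zero =>
    intro hl bs sati mh mb hlen hhl hbs _ _
    exact absurd (List.length_eq_zero_iff.mp hlen) hbs
  | succ n ih =>
    intro hl bs sati mh mb hlen hhl hbs hmh hmb
    have hmbmem : mb ∈ bs := PySem.List.min?_mem hmb
    have hrembs : PySem.List.remove? bs mb = some (bs.erase mb) :=
      PySem.List.remove?_eq_some_erase bs mb hmbmem
    have hsb := sorted_eq_min_cons bs mb hmb
    have hsh := sorted_eq_min_cons hl mh hmh
    have hlenerase : (bs.erase mb).length = n := by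
      have := List.length_erase_of_mem hmbmem; omega
    rw [feedDogLoop]
    simp only [dif_pos (And.intro hhl hbs), hrembs, Option.getD_some]
    by_cases hgt : mh > mb
    · -- biscuit too small: drop it
      rw [if_pos hgt, hmh, Option.getD_some]
      have hg : pvGreedy (PySem.List.sorted hl (fun x => x) false)
            (PySem.List.sorted bs (fun x => x) false)
          = pvGreedy (PySem.List.sorted hl (fun x => x) false)
            (PySem.List.sorted (bs.erase mb) (fun x => x) false) := by
        rw [hsb, hsh]; simp only [pvGreedy]; rw [if_neg (by omega), ← hsh]
      rw [hg]
      have hs0 : PySem.List.sorted ([] : List Int) (fun x => x) false = [] :=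
        (PySem.List.sorted_eq_nil_iff _ _ _).mpr rfl
      by_cases hbe : bs.erase mb = []
      · rw [hbe, feedDogLoop]
        simp [hs0, pvGreedy_nil_right]
      · rcases hmb' : PySem.List.min? (bs.erase mb) (fun x => x) with _ | mb'
        · exact absurd ((PySem.List.min?_eq_none_iff _ _).mp hmb') hbe
        · simp only [Option.getD_some]
          exact ih hl (bs.erase mb) sati mh mb' hlenerase hhl hbe hmh hmb'
    · -- feed: drop both minima, count one
      rw [if_neg hgt]
      simp only [PySem.List.remove?_eq_some_erase hl mh (PySem.List.min?_mem hmh), Option.getD_some]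
      have hle : mh ≤ mb := by omega
      have hg : pvGreedy (PySem.List.sorted hl (fun x => x) false)
            (PySem.List.sorted bs (fun x => x) false)
          = pvGreedy (PySem.List.sorted (hl.erase mh) (fun x => x) false)
            (PySem.List.sorted (bs.erase mb) (fun x => x) false) + 1 := by
        rw [hsb, hsh]; simp only [pvGreedy]; rw [if_pos hle]
      rw [hg]
      have hs0 : PySem.List.sorted ([] : List Int) (fun x => x) false = [] :=
        (PySem.List.sorted_eq_nil_iff _ _ _).mpr rfl
      by_cases hhe : hl.erase mh = []
      · rw [hhe, feedDogLoop]
        simp [hs0, pvGreedy_nil_left]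
      · by_cases hbe : bs.erase mb = []
        · rw [hbe, feedDogLoop]
          simp [hs0, pvGreedy_nil_right, hhe]
        · rcases hmh' : PySem.List.min? (hl.erase mh) (fun x => x) with _ | mh'
          · exact absurd ((PySem.List.min?_eq_none_iff _ _).mp hmh') hhe
          rcases hmb' : PySem.List.min? (bs.erase mb) (fun x => x) with _ | mb'
          · exact absurd ((PySem.List.min?_eq_none_iff _ _).mp hmb') hbe
          simp only [Option.getD_some]
          rw [ih (hl.erase mh) (bs.erase mb) (sati + 1) mh' mb' hlenerase hhe hbe hmh' hmb']
          omega

-- B's index fold computes the greedy on the suffix of dogs it has not yet consumed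
theorem fold_eq_greedy (dogs : List Int) :
    ∀ (sbs : List Int) (i : Nat), i ≤ dogs.length →
      sbs.foldl
        (fun i b =>
          if i < (dogs.length : Int) then
            match PySem.List.pyGet? dogs i with
            | some d => if d ≤ b then i + 1 else i
            | none => i
          else i) (i : Int)
        = (i : Int) + pvGreedy (dogs.drop i) sbs := by
  intro sbs
  induction sbs with
  | nil => intro i _; simp [pvGreedy_nil_right]
  | cons b sbs ih =>
    intro i hi
    rcases eq_or_lt_of_le hi with heq | hlt
    · -- pointer exhausted: suffix is empty and stays empty
      have hdrop : dogs.drop i = [] := by simp [heq]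
      have hc : ¬ ((i : Int) < (dogs.length : Int)) := by exact_mod_cast not_lt.mpr (le_of_eq heq.symm)
      rw [List.foldl_cons, if_neg hc, ih i hi, hdrop, pvGreedy_nil_left, pvGreedy_nil_left]
    · have hget : PySem.List.pyGet? dogs (i : Int) = some dogs[i] := by
        rw [PySem.List.pyGet?_natCast]; simp [List.getElem?_eq_getElem hlt]
      have hdrop : dogs.drop i = dogs[i] :: dogs.drop (i + 1) :=
        List.drop_eq_getElem_cons hlt
      have hc : ((i : Int) < (dogs.length : Int)) = True := eq_true (by exact_mod_cast hlt)
      simp only [List.foldl_cons, hc, if_true, hget]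
      by_cases hle : dogs[i] ≤ b
      · rw [if_pos hle]
        have hca : ((i : Int) + 1) = ((i + 1 : Nat) : Int) := by push_cast; ring
        rw [hca, ih (i + 1) hlt, hdrop]
        simp only [pvGreedy]
        rw [if_pos hle]
        push_cast; ring
      · rw [if_neg hle, ih i hi, hdrop]
        simp only [pvGreedy]
        rw [if_neg hle, ← hdrop]

theorem feedDog_alt_eq_greedy (hl bs : List Int) :
    feedDog_alt hl bs =
      pvGreedy (PySem.List.sorted hl (fun x => x) false)
               (PySem.List.sorted bs (fun x => x) false) := by
  unfold feedDog_alt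
  have := fold_eq_greedy (PySem.List.sorted hl (fun x => x) false)
            (PySem.List.sorted bs (fun x => x) false) 0 (Nat.zero_le _)
  simpa using this

-- ===== VERDICT (by name: the statement is the Claim_ definition above) =====
theorem feedDog_spec : Claim_equal_feedDog := by
  intro hl bs _ hpre
  rcases hpre with ⟨hhl, hbs⟩
  unfold Spec_feedDog feedDog
  rcases hmh : PySem.List.min? hl (fun x => x) with _ | mh
  · exact absurd ((PySem.List.min?_eq_none_iff _ _).mp hmh) hhl
  rcases hmb : PySem.List.min? bs (fun x => x) with _ | mb
  · exact absurd ((PySem.List.min?_eq_none_iff _ _).mp hmb) hbs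
  show feedDogLoop hl bs mh mb 0 = feedDog_alt hl bs
  rw [feedDogLoop_eq_greedy bs.length hl bs 0 mh mb rfl hhl hbs hmh hmb,
      feedDog_alt_eq_greedy, zero_add]
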